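-- pv_equiv track=rewrite | github.com/JoJoonBalSsa/Taint-Bomb | bin/main/pyscripts/removeComments.py | __unify_brace_style
-- ===== SOURCE A (Python) =====
-- def __unify_brace_style(code):
--     lines = code.splitlines()
--     result = []
--     in_declaration = False
--     declaration_lines = []
--
--     for i in range(len(lines)):
--         current_line = lines[i].rstrip()
--
--         if in_declaration:
--             if current_line.strip() == '{':
--                 # 선언부 끝에 중괄호 추가
--                 declaration_lines[-1] += ' {'
--                 result.extend(declaration_lines)
--                 in_declaration = False
--                 declaration_lines = []
--             elif '{' in current_line.strip():
--                 declaration_lines[-1] += current_line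
--                 result.extend(declaration_lines)
--                 in_declaration = False
--                 declaration_lines = []
--             else:
--                 declaration_lines.append(current_line)
--         elif ('class ' in current_line or 'interface ' in current_line) and not current_line.endswith('{'):
--             # 새로운 선언부 시작
--             in_declaration = True
--             declaration_lines.append(current_line)
--         else:
--             result.append(current_line)
--
--     # 파일 끝에 미완성 선언부가 있는 경우 처리
--     if declaration_lines:
--         result.extend(declaration_lines)
--
--
--     result.append("\n\n\n")
--     return '\n'.join(result)
-- ===== SOURCE B (Python) =====
-- def _span_until(pred, xs):
--     """Split xs at the first element satisfying pred: (prefix, suffix)."""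
--     for i, x in enumerate(xs):
--         if pred(x):
--             return xs[:i], xs[i:]
--     return xs, []
--
--
-- def __unify_brace_style(code):
--     is_decl = lambda l: ('class ' in l or 'interface ' in l) and not l.endswith('{')
--     has_brace = lambda l: '{' in l.strip()
--     out = []
--     rest = [l.rstrip() for l in code.splitlines()]
--     while True:
--         pre, rest = _span_until(is_decl, rest)
--         out += pre
--         if not rest:
--             break
--         decl, tail = rest[0], rest[1:]
--         body, tail2 = _span_until(has_brace, tail)
--         buf = [decl] + body
--         if not tail2:
--             out += buf
--             break
--         b = tail2[0]
--         buf[-1] += ' {' if b.strip() == '{' else b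
--         out += buf
--         rest = tail2[1:]
--     out.append("\n\n\n")
--     return '\n'.join(out)
-- ===== Notes on version B (the rewrite author's own statement) =====
-- stated objective: alternative
-- what changed: Replaces A's per-line state machine (boolean in_declaration flag with a deferred buffer threaded through one for-loop) by a segmentation approach: repeatedly search for the next declaration line and the next brace line with a span_until splitter and splice whole slices into the output, so there is no per-line state at all.
import Mathlib
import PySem

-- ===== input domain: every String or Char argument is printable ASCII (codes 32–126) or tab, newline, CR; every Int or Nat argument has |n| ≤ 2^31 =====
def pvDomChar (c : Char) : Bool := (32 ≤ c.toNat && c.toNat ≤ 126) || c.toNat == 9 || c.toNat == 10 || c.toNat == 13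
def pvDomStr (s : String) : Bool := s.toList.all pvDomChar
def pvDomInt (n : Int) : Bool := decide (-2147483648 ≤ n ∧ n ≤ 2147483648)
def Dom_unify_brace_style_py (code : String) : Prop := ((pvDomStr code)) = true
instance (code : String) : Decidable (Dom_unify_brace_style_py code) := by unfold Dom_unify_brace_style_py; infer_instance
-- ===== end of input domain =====

-- B replaces A's per-line state machine by a segmentation pass that repeatedly
-- searches for the next declaration line and the next brace line and splices
-- whole slices; objective: alternative (same cost).

-- ===== PORT A =====
-- declaration_lines[-1] += s (the loop invariant keeps the list nonempty; getLastD "" is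
-- only reached with a nonempty list)
def pvModLast (d : List String) (s : String) : List String :=
  d.dropLast ++ [d.getLastD "" ++ s]

-- one iteration of A's for-loop; state = (result, in_declaration, declaration_lines)
def pvStepA (st : List String × Bool × List String) (line : String) :
    List String × Bool × List String :=
  let currentLine := PySem.Str.rstrip line
  if st.2.1 then
    if PySem.Str.strip currentLine == "{" then
      (st.1 ++ pvModLast st.2.2 " {", false, [])
    else if PySem.Str.isIn "{" (PySem.Str.strip currentLine) then
      (st.1 ++ pvModLast st.2.2 currentLine, false, [])
    else
      (st.1, true, st.2.2 ++ [currentLine])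
  else if (PySem.Str.isIn "class " currentLine || PySem.Str.isIn "interface " currentLine)
          && !PySem.Str.endswith currentLine "{" then
    (st.1, true, [currentLine])
  else
    (st.1 ++ [currentLine], false, [])

def unify_brace_style_py (code : String) : String :=
  let lines := PySem.Str.splitlines code
  let st := lines.foldl pvStepA ([], false, [])
  let result := if st.2.2.isEmpty then st.1 else st.1 ++ st.2.2
  PySem.Str.join "\n" (result ++ ["\n\n\n"])

-- ===== PORT B =====
def pvIsDecl (l : String) : Bool :=
  (PySem.Str.isIn "class " l || PySem.Str.isIn "interface " l) && !PySem.Str.endswith l "{"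

def pvHasBrace (l : String) : Bool := PySem.Str.isIn "{" (PySem.Str.strip l)

-- _span_until: split xs at the first element satisfying pred
def pvSpanUntil (p : String → Bool) : List String → List String × List String
  | [] => ([], [])
  | x :: t =>
    if p x then ([], x :: t)
    else
      let r := pvSpanUntil p t
      (x :: r.1, r.2)

theorem pvSpanUntil_snd_length_le (p : String → Bool) (xs : List String) :
    (pvSpanUntil p xs).2.length ≤ xs.length := by
  induction xs with
  | nil => simp [pvSpanUntil]
  | cons x t ih =>
    simp only [pvSpanUntil]
    split <;> simp
    exact le_trans ih (Nat.le_succ _)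

-- B's while loop: each round splices the pre-declaration slice, then the declaration
-- buffer closed by the first brace line, then recurses on the remainder
def pvGoB (rest : List String) : List String :=
  let s := pvSpanUntil pvIsDecl rest
  match h : s.2 with
  | [] => s.1
  | decl :: tail =>
    let s2 := pvSpanUntil pvHasBrace tail
    match h2 : s2.2 with
    | [] => s.1 ++ decl :: s2.1
    | b :: t3 =>
      s.1 ++ pvModLast (decl :: s2.1) (if PySem.Str.strip b == "{" then " {" else b)
          ++ pvGoB t3
termination_by rest.length
decreasing_by
  have hA := pvSpanUntil_snd_length_le pvIsDecl rest
  have hB := pvSpanUntil_snd_length_le pvHasBrace tail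
  rw [h] at hA
  rw [h2] at hB
  simp at hA hB
  omega

def unify_brace_style_py_alt (code : String) : String :=
  let lines := (PySem.Str.splitlines code).map PySem.Str.rstrip
  PySem.Str.join "\n" (pvGoB lines ++ ["\n\n\n"])

-- ===== PRECONDITION & SPEC =====
def Spec_unify_brace_style_py (code : String) (out : String) : Prop := out = unify_brace_style_py_alt code
instance (code : String) (out : String) : Decidable (Spec_unify_brace_style_py code out) := by unfold Spec_unify_brace_style_py; infer_instance

-- ===== CLAIM (what is proved, stated in full; the proofs are below) =====
def Claim_equal_unify_brace_style_py : Prop := ∀ (code : String), Dom_unify_brace_style_py code → Spec_unify_brace_style_py code (unify_brace_style_py code)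

-- ===== LEMMAS AND PROOFS =====

-- the in-declaration part of one round of pvGoB, with an arbitrary buffer d
def pvHandle (d tail : List String) : List String :=
  let s2 := pvSpanUntil pvHasBrace tail
  match s2.2 with
  | [] => d ++ s2.1
  | b :: t3 =>
    pvModLast (d ++ s2.1) (if PySem.Str.strip b == "{" then " {" else b) ++ pvGoB t3

theorem pvGoB_eq (rest : List String) :
    pvGoB rest =
      (pvSpanUntil pvIsDecl rest).1 ++
        (match (pvSpanUntil pvIsDecl rest).2 with
         | [] => []
         | decl :: tail => pvHandle [decl] tail) := by
  rw [pvGoB]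
  rcases h : (pvSpanUntil pvIsDecl rest).2 with _ | ⟨decl, tail⟩
  · simp
  · simp only [pvHandle]
    rcases h2 : (pvSpanUntil pvHasBrace tail).2 with _ | ⟨b, t3⟩ <;> simp

theorem pvGoB_nil : pvGoB [] = [] := by
  rw [pvGoB_eq]; simp [pvSpanUntil]

theorem pvGoB_not_decl (l : String) (t : List String) (h : pvIsDecl l = false) :
    pvGoB (l :: t) = l :: pvGoB t := by
  rw [pvGoB_eq, pvGoB_eq]
  have hs : pvSpanUntil pvIsDecl (l :: t) =
      (l :: (pvSpanUntil pvIsDecl t).1, (pvSpanUntil pvIsDecl t).2) := by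
    simp [pvSpanUntil, h]
  rw [hs]
  rcases (pvSpanUntil pvIsDecl t).2 with _ | ⟨decl, tail⟩ <;> simp

theorem pvGoB_decl (l : String) (t : List String) (h : pvIsDecl l = true) :
    pvGoB (l :: t) = pvHandle [l] t := by
  rw [pvGoB_eq]
  simp [pvSpanUntil, h]

theorem pvHandle_nil (d : List String) : pvHandle d [] = d := by
  simp [pvHandle, pvSpanUntil]

theorem pvHandle_brace (d : List String) (c : String) (t : List String)
    (h : pvHasBrace c = true) :
    pvHandle d (c :: t) =
      pvModLast d (if PySem.Str.strip c == "{" then " {" else c) ++ pvGoB t := by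
  simp [pvHandle, pvSpanUntil, h]

theorem pvHandle_no_brace (d : List String) (c : String) (t : List String)
    (h : pvHasBrace c = false) :
    pvHandle d (c :: t) = pvHandle (d ++ [c]) t := by
  have hs : pvSpanUntil pvHasBrace (c :: t) =
      (c :: (pvSpanUntil pvHasBrace t).1, (pvSpanUntil pvHasBrace t).2) := by
    simp [pvSpanUntil, h]
  simp only [pvHandle, hs]
  rcases (pvSpanUntil pvHasBrace t).2 with _ | ⟨b, t3⟩ <;> simp

-- A's finalisation of a loop state: result plus leftover declaration lines
def pvFin (st : List String × Bool × List String) : List String := st.1 ++ st.2.2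

theorem pvStepA_true (res d : List String) (line : String) :
    pvStepA (res, true, d) line =
      (if PySem.Str.strip (PySem.Str.rstrip line) == "{" then
        (res ++ pvModLast d " {", false, [])
      else if PySem.Str.isIn "{" (PySem.Str.strip (PySem.Str.rstrip line)) then
        (res ++ pvModLast d (PySem.Str.rstrip line), false, [])
      else (res, true, d ++ [PySem.Str.rstrip line])) := by
  simp only [pvStepA]; rw [if_pos trivial]

theorem pvStepA_false (res : List String) (line : String) :
    pvStepA (res, false, []) line =
      (if pvIsDecl (PySem.Str.rstrip line) then
        (res, true, [PySem.Str.rstrip line])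
      else (res ++ [PySem.Str.rstrip line], false, [])) := by
  simp only [pvStepA, pvIsDecl]; rw [if_neg (by simp)]
  rfl

theorem pvFoldA (ls : List String) :
    (∀ (res d : List String),
      pvFin (ls.foldl pvStepA (res, true, d)) = res ++ pvHandle d (ls.map PySem.Str.rstrip)) ∧
    (∀ (res : List String),
      pvFin (ls.foldl pvStepA (res, false, [])) = res ++ pvGoB (ls.map PySem.Str.rstrip)) := by
  induction ls with
  | nil =>
    refine ⟨fun res d => ?_, fun res => ?_⟩
    · simp [pvFin, pvHandle_nil]
    · simp [pvFin, pvGoB_nil]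
  | cons l t ih =>
    refine ⟨fun res d => ?_, fun res => ?_⟩
    · simp only [List.foldl_cons, pvStepA_true, List.map_cons]
      split_ifs with h2 h3
      · rw [ih.2, pvHandle_brace _ _ _ (by
          simp only [pvHasBrace, beq_iff_eq.mp h2]; decide), if_pos h2]
        simp
      · rw [ih.2, pvHandle_brace _ _ _ h3, if_neg h2]
        simp
      · rw [ih.1, pvHandle_no_brace _ _ _ (by simpa only [pvHasBrace, Bool.not_eq_true] using h3)]
    · simp only [List.foldl_cons, pvStepA_false, List.map_cons]
      split_ifs with h1
      · rw [ih.1, pvGoB_decl _ _ h1]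
      · rw [ih.2, pvGoB_not_decl _ _ (by simpa using h1)]
        simp

-- ===== VERDICT (by name: the statement is the Claim_ definition above) =====
theorem unify_brace_style_py_spec : Claim_equal_unify_brace_style_py := by
  intro code _
  show unify_brace_style_py code = unify_brace_style_py_alt code
  simp only [unify_brace_style_py, unify_brace_style_py_alt]
  have h := (pvFoldA (PySem.Str.splitlines code)).2 []
  simp only [List.nil_append] at h
  rw [← h]
  unfold pvFin
  split_ifs with hE
  · simp [List.isEmpty_iff.mp hE]
  · rfl
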